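-- pv_equiv track=rewrite | github.com/OFA-Tech/FiapAutoKraft | Console-ComputationalVision/main.py | _format_event_payload
-- ===== SOURCE A (Python) =====
-- def _format_event_payload(payload: dict) -> str:
--     ordered = dict(payload)
--     parts: list[str] = []
--     for key in ("timestamp", "thread", "command", "port", "ser_id", "status"):
--         if key in ordered:
--             parts.append(f"{key}={ordered.pop(key)}")
--     for key in sorted(ordered):
--         parts.append(f"{key}={ordered[key]}")
--     return " ".join(parts)
-- ===== SOURCE B (Python) =====
-- _PRIORITY_INDEX = {
--     "timestamp": 0,
--     "thread": 1,
--     "command": 2,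
--     "port": 3,
--     "ser_id": 4,
--     "status": 5,
-- }
--
--
-- def _format_event_payload(payload: dict) -> str:
--     keys = sorted(payload, key=lambda k: (_PRIORITY_INDEX.get(k, 6), k))
--     return " ".join(f"{k}={payload[k]}" for k in keys)
-- ===== Notes on version B (the rewrite author's own statement) =====
-- stated objective: simpler
-- what changed: Replaces A's two-phase construction (a fixed-order membership/pop loop over the six priority keys, then a separate sort of the remaining keys) with a single sort of all keys under the composite key (priority_index.get(k, 6), k).
import Mathlib
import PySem

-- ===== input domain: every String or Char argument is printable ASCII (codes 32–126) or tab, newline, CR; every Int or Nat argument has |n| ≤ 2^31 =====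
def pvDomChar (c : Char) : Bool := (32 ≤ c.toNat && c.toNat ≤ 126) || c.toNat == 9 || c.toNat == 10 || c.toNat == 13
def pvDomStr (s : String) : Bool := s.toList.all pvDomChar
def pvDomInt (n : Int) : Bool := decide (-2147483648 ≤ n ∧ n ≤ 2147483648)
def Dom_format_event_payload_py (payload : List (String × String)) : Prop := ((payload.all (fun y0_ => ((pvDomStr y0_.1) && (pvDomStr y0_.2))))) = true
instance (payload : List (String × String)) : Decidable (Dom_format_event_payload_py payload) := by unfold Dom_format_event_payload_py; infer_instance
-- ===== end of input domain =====

-- ===== PORT A =====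
-- B replaces A's two-phase build (fixed-order pop loop over six priority keys, then a
-- separate sort of the rest) by one sort of all keys under a composite (priority, key) key.

-- the literal priority tuple of A
def pvPrioList : List String := ["timestamp", "thread", "command", "port", "ser_id", "status"]

def format_event_payload_py (payload : List (String × String)) : String :=
  let ordered := PySem.Dict.ofList payload
  let st := pvPrioList.foldl
    (fun (st : PySem.Dict String String × List String) key =>
      if st.1.contains key then
        match st.1.pop? key with
        | some (v, d') => (d', st.2 ++ [key ++ "=" ++ v])
        | none => st          -- unreachable: contains key = true
      else st)
    (ordered, [])
  let parts := (PySem.List.sorted st.1.keys (fun k => k)).foldl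
    (fun parts key => parts ++ [key ++ "=" ++ st.1.getD key ""]) st.2
  PySem.Str.join " " parts

-- ===== PORT B =====
def pvPrioIdx : PySem.Dict String Int :=
  PySem.Dict.ofList
    [("timestamp", 0), ("thread", 1), ("command", 2), ("port", 3), ("ser_id", 4), ("status", 5)]

def format_event_payload_py_alt (payload : List (String × String)) : String :=
  let d := PySem.Dict.ofList payload
  let keys := PySem.List.sorted d.keys (fun k => toLex ((pvPrioIdx.getD k 6 : Int), k))
  PySem.Str.join " " (keys.map (fun k => k ++ "=" ++ d.getD k ""))

-- ===== PRECONDITION & SPEC =====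
def Spec_format_event_payload_py (payload : List (String × String)) (out : String) : Prop := out = format_event_payload_py_alt payload
instance (payload : List (String × String)) (out : String) : Decidable (Spec_format_event_payload_py payload out) := by unfold Spec_format_event_payload_py; infer_instance

-- ===== CLAIM (what is proved, stated in full; the proofs are below) =====
def Claim_equal_format_event_payload_py : Prop := ∀ (payload : List (String × String)), Dom_format_event_payload_py payload → Spec_format_event_payload_py payload (format_event_payload_py payload)

-- ===== LEMMAS AND PROOFS =====

-- facts about Dict.erase / Dict.pop? (the prelude has no erase lemmas)
theorem pv_erase_of_not_contains {κ ν : Type} [BEq κ] (d : PySem.Dict κ ν) (k : κ)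
    (h : d.contains k = false) : d.erase k = d := by
  apply PySem.Dict.ext
  show d.items.filter _ = d.items
  rw [List.filter_eq_self]
  intro p hp
  simp [PySem.Dict.contains] at h
  simp [h p.1 p.2 hp]

theorem pv_get?_erase_of_ne {κ ν : Type} [BEq κ] [LawfulBEq κ] (d : PySem.Dict κ ν) (j k : κ)
    (h : k ≠ j) : (d.erase j).get? k = d.get? k := by
  show Option.map _ (List.find? _ (d.items.filter _)) = _
  rw [List.find?_filter]
  have : (fun (a : κ × ν) => decide ((!a.1 == j) = true ∧ (a.1 == k) = true)) = fun p => p.1 == k := by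
    funext p
    by_cases hp : p.1 = k
    · subst hp; simp [h]
    · simp [hp]
  rw [this]
  rfl

theorem pv_contains_erase_of_ne {κ ν : Type} [BEq κ] [LawfulBEq κ] (d : PySem.Dict κ ν) (j k : κ)
    (h : k ≠ j) : (d.erase j).contains k = d.contains k := by
  rw [PySem.Dict.contains_eq_isSome_get?, PySem.Dict.contains_eq_isSome_get?,
    pv_get?_erase_of_ne d j k h]

theorem pv_getD_erase_of_ne {κ ν : Type} [BEq κ] [LawfulBEq κ] (d : PySem.Dict κ ν) (j k : κ)
    (v : ν) (h : k ≠ j) : (d.erase j).getD k v = d.getD k v := by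
  simp [PySem.Dict.getD_eq_get?_getD, pv_get?_erase_of_ne d j k h]

theorem pv_foldl_erase_get? {κ ν : Type} [BEq κ] [LawfulBEq κ] (ks : List κ)
    (d : PySem.Dict κ ν) (k : κ) (h : k ∉ ks) :
    (ks.foldl (fun d' j => d'.erase j) d).get? k = d.get? k := by
  induction ks generalizing d with
  | nil => rfl
  | cons j ks ih =>
    simp only [List.mem_cons, not_or] at h
    rw [List.foldl_cons, ih _ h.2, pv_get?_erase_of_ne d j k h.1]

theorem pv_foldl_erase_keys {κ ν : Type} [BEq κ] [LawfulBEq κ] (ks : List κ)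
    (d : PySem.Dict κ ν) :
    (ks.foldl (fun d' j => d'.erase j) d).keys = d.keys.filter (fun k => !ks.contains k) := by
  induction ks generalizing d with
  | nil => simp
  | cons j ks ih =>
    rw [List.foldl_cons, ih]
    have hk : (d.erase j).keys = d.keys.filter (fun k => !(k == j)) :=
      (List.filter_map (p := fun k => !(k == j)) (f := Prod.fst) (l := d.items)).symm
    rw [hk, List.filter_filter]
    apply List.filter_congr
    intro k _
    simp [Bool.not_or, eq_comm, Bool.and_comm]

-- A's priority loop, characterised: it erases the priority keys and formats the present ones
theorem pv_loopA (ks : List String) (d : PySem.Dict String String) (parts : List String)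
    (hnd : ks.Nodup) :
    ks.foldl
      (fun (st : PySem.Dict String String × List String) key =>
        if st.1.contains key then
          match st.1.pop? key with
          | some (v, d') => (d', st.2 ++ [key ++ "=" ++ v])
          | none => st
        else st)
      (d, parts) =
    (ks.foldl (fun d' j => d'.erase j) d,
     parts ++ (ks.filter (fun k => d.contains k)).map (fun k => k ++ "=" ++ d.getD k "")) := by
  induction ks generalizing d parts with
  | nil => simp
  | cons j ks ih =>
    have hnd' := (List.nodup_cons.mp hnd).2
    have hj := (List.nodup_cons.mp hnd).1
    rw [List.foldl_cons, List.foldl_cons]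
    by_cases hc : d.contains j
    · have hget : d.get? j = some (d.getD j "") := by
        have h1 : (d.get? j).isSome := by rw [← PySem.Dict.contains_eq_isSome_get?]; exact hc
        obtain ⟨v, hv⟩ := Option.isSome_iff_exists.mp h1
        rw [hv, PySem.Dict.getD_of_get?_eq_some d "" hv]
      have hstep : (if d.contains j then
          match d.pop? j with
          | some (v, d') => (d', parts ++ [j ++ "=" ++ v])
          | none => ((d, parts) : PySem.Dict String String × List String)
        else (d, parts)) = (d.erase j, parts ++ [j ++ "=" ++ d.getD j ""]) := by
        rw [if_pos hc]
        show (match d.pop? j with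
          | some (v, d') => (d', parts ++ [j ++ "=" ++ v])
          | none => ((d, parts) : PySem.Dict String String × List String)) = _
        rw [show d.pop? j = some (d.getD j "", d.erase j) by
          simp [PySem.Dict.pop?, hget]]
      rw [hstep, ih _ _ hnd']
      congr 1
      rw [List.filter_cons_of_pos hc, List.map_cons]
      have hfc : ks.filter (fun k => (d.erase j).contains k) = ks.filter (fun k => d.contains k) := by
        apply List.filter_congr
        intro k hk
        exact pv_contains_erase_of_ne d j k (fun he => hj (he ▸ hk))
      rw [hfc]
      have hmc : (ks.filter (fun k => d.contains k)).map (fun k => k ++ "=" ++ (d.erase j).getD k "") =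
          (ks.filter (fun k => d.contains k)).map (fun k => k ++ "=" ++ d.getD k "") := by
        apply List.map_congr_left
        intro k hk
        have hk' := List.mem_of_mem_filter hk
        rw [pv_getD_erase_of_ne d j k "" (fun he => hj (he ▸ hk'))]
      rw [hmc, List.append_cons, List.append_assoc]
      simp
    · simp only [Bool.not_eq_true] at hc
      simp only [hc, Bool.false_eq_true, if_false]
      rw [ih _ _ hnd', pv_erase_of_not_contains d j hc, List.filter_cons_of_neg (by simp [hc])]

-- priority-index facts, by computation on the six literal keys
theorem pv_prio_nodup : pvPrioList.Nodup := by decide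

theorem pv_prioIdx_keys : pvPrioIdx.keys = pvPrioList := by decide

theorem pv_prioIdx_of_not_mem (k : String) (h : k ∉ pvPrioList) : pvPrioIdx.getD k 6 = 6 := by
  apply PySem.Dict.getD_of_not_contains
  rw [← Bool.not_eq_true, PySem.Dict.contains_iff_mem_keys, pv_prioIdx_keys]
  exact h

theorem pv_prioIdx_lt_six : ∀ k ∈ pvPrioList, pvPrioIdx.getD k 6 < 6 := by decide

theorem pv_prio_pairwise :
    pvPrioList.Pairwise
      (fun a b => (toLex ((pvPrioIdx.getD a 6 : Int), a)) < toLex ((pvPrioIdx.getD b 6 : Int), b)) := by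
  decide

-- B's single composite-key sort = A's key order (priority keys present, then sorted rest)
theorem pv_keys_eq (d : PySem.Dict String String) (hnd : d.keys.Nodup) :
    PySem.List.sorted d.keys (fun k => toLex ((pvPrioIdx.getD k 6 : Int), k)) =
      pvPrioList.filter (fun k => d.contains k) ++
        PySem.List.sorted (d.keys.filter (fun k => !pvPrioList.contains k)) (fun k => k) := by
  set key : String → Int ×ₗ String := fun k => toLex ((pvPrioIdx.getD k 6 : Int), k) with hkey
  set P := pvPrioList.filter (fun k => d.contains k) with hP
  set R := PySem.List.sorted (d.keys.filter (fun k => !pvPrioList.contains k)) (fun k => k) with hR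
  have hRperm : R.Perm (d.keys.filter (fun k => !pvPrioList.contains k)) :=
    PySem.List.sorted_perm _ _ _
  have hRnd : R.Nodup := hRperm.nodup_iff.mpr (hnd.filter _)
  have hmemR : ∀ k, k ∈ R ↔ (k ∈ d.keys ∧ k ∉ pvPrioList) := by
    intro k
    rw [hRperm.mem_iff, List.mem_filter]
    simp
  have hmemP : ∀ k, k ∈ P ↔ (k ∈ pvPrioList ∧ k ∈ d.keys) := by
    intro k
    rw [hP, List.mem_filter, PySem.Dict.contains_iff_mem_keys]
  apply PySem.List.sorted_eq_of_perm_of_pairwise_lt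
  · -- the two-phase key order is a permutation of the keys
    rw [List.perm_ext_iff_of_nodup]
    · intro k
      simp only [List.mem_append, hmemP, hmemR]
      constructor
      · rintro (⟨_, h2⟩ | ⟨h1, _⟩) <;> assumption
      · intro hk
        by_cases hp : k ∈ pvPrioList
        · exact Or.inl ⟨hp, hk⟩
        · exact Or.inr ⟨hk, hp⟩
    · rw [List.nodup_append]
      refine ⟨(by decide : pvPrioList.Nodup).filter _, hRnd, ?_⟩
      intro a haP b hbR he
      exact ((hmemR b).mp hbR).2 (he ▸ ((hmemP a).mp haP).1)
    · exact hnd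
  · -- and it is strictly increasing under the composite key
    rw [List.pairwise_append]
    refine ⟨?_, ?_, ?_⟩
    · exact List.Pairwise.filter _ pv_prio_pairwise
    · have h1 : R.Pairwise (fun a b => (fun k => k) a ≤ (fun k => k) b) :=
        PySem.List.sorted_pairwise _ _
      refine List.Pairwise.imp_of_mem ?_ (h1.and hRnd)
      rintro a b ha hb ⟨hle, hne⟩
      rw [hkey]
      simp only []
      rw [pv_prioIdx_of_not_mem a ((hmemR a).mp ha).2,
        pv_prioIdx_of_not_mem b ((hmemR b).mp hb).2]
      rw [Prod.Lex.toLex_lt_toLex]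
      exact Or.inr ⟨rfl, lt_of_le_of_ne hle hne⟩
    · intro a haP b hbR
      have ha : a ∈ pvPrioList := ((hmemP a).mp haP).1
      have hb : b ∉ pvPrioList := ((hmemR b).mp hbR).2
      rw [hkey]
      simp only []
      rw [Prod.Lex.toLex_lt_toLex]
      left
      rw [pv_prioIdx_of_not_mem b hb]
      exact pv_prioIdx_lt_six a ha

-- ===== VERDICT (by name: the statement is the Claim_ definition above) =====
theorem format_event_payload_py_spec : Claim_equal_format_event_payload_py := by
  intro payload _
  unfold Spec_format_event_payload_py format_event_payload_py format_event_payload_py_alt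
  dsimp only
  have hnd : (PySem.Dict.ofList payload).keys.Nodup := PySem.Dict.nodup_keys_ofList payload
  set d0 := PySem.Dict.ofList payload with hd0
  rw [pv_loopA pvPrioList d0 [] pv_prio_nodup]
  simp only [List.nil_append]
  rw [PySem.List.foldl_append_singleton_eq_map, pv_foldl_erase_keys, pv_keys_eq d0 hnd,
    List.map_append]
  congr 2
  apply List.map_congr_left
  intro k hk
  have hk' : k ∉ pvPrioList := by
    have := (PySem.List.mem_sorted _ _ _ _).mp hk
    have := List.mem_filter.mp this
    simpa using this.2
  rw [PySem.Dict.getD_eq_get?_getD, PySem.Dict.getD_eq_get?_getD,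
    pv_foldl_erase_get? pvPrioList d0 k hk']
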